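-- pv_equiv track=rewrite | github.com/harujagdl/panel-haruja-TN--v2 | tools/zpl_logo_from_url.py | bw_to_gfa
-- ===== SOURCE A (Python) =====
-- def bw_to_gfa(width: int, height: int, bw_pixels: list[int]) -> str:
--     bytes_per_row = (width + 7) // 8
--     total_bytes = bytes_per_row * height
--     rows: list[str] = []
--
--     for y in range(height):
--         row_hex = []
--         for byte_index in range(bytes_per_row):
--             value = 0
--             for bit in range(8):
--                 x = byte_index * 8 + bit
--                 if x < width:
--                     pixel = bw_pixels[y * width + x]
--                     value |= (pixel & 1) << (7 - bit)
--             row_hex.append(f"{value:02X}")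
--         rows.append("".join(row_hex))
--
--     return f"^GFA,{total_bytes},{total_bytes},{bytes_per_row},{''.join(rows)}"
-- ===== SOURCE B (Python) =====
-- def bw_to_gfa(width: int, height: int, bw_pixels: list[int]) -> str:
--     bytes_per_row = (width + 7) // 8
--     total_bytes = bytes_per_row * height
--     data: list[str] = []
--     for y in range(height):
--         bits = "".join("1" if bw_pixels[y * width + x] & 1 else "0" for x in range(width))
--         bits += "0" * (bytes_per_row * 8 - width)
--         for i in range(0, bytes_per_row * 8, 8):
--             data.append(f"{int(bits[i:i + 8], 2):02X}")
--     return f"^GFA,{total_bytes},{total_bytes},{bytes_per_row},{''.join(data)}"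
-- ===== Notes on version B (the rewrite author's own statement) =====
-- stated objective: alternative
-- what changed: B replaces A's per-byte triple-nested bit loop (or/shift accumulation per byte) by building each row as a '0'/'1' bit string once, right-padding it to a whole number of bytes, and converting 8-character chunks with int(chunk, 2), appending all bytes into one flat list.
import Mathlib
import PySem

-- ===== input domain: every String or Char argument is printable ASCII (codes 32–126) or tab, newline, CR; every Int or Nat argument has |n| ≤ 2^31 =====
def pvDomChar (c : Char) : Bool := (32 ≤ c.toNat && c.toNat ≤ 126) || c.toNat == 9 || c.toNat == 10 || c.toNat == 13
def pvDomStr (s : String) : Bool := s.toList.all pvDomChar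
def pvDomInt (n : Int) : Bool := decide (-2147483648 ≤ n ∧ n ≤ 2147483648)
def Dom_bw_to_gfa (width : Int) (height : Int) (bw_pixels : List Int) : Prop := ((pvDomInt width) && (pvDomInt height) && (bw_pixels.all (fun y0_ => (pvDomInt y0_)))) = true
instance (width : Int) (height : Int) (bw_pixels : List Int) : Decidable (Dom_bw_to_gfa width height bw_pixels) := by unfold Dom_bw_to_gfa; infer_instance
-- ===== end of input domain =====

-- B builds each row as a '0'/'1' bit string, pads it, and converts 8-char chunks with int(_, 2),
-- instead of A's per-byte or/shift bit loop; same cost, alternative decomposition.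


-- shared helper for the f"{value:02X}" formatting both Pythons perform;
-- exact for 0 ≤ v ≤ 255, which holds for every value either program formats
def pvHexDigit (n : Nat) : Char := if n < 10 then Char.ofNat (48 + n) else Char.ofNat (55 + n)
def pvHex2 (v : Int) : String := String.ofList [pvHexDigit (v.toNat / 16), pvHexDigit (v.toNat % 16)]

-- ===== PORT A =====
def bw_to_gfa (width : Int) (height : Int) (bw_pixels : List Int) : String :=
  let bytes_per_row := PySem.Int.floordiv (width + 7) 8
  let total_bytes := bytes_per_row * height
  let rows : List String :=
    (PySem.List.pyRange 0 height 1).map (fun y =>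
      String.join ((PySem.List.pyRange 0 bytes_per_row 1).map (fun byte_index =>
        pvHex2 ((PySem.List.pyRange 0 8 1).foldl (fun value bit =>
          let x := byte_index * 8 + bit
          if x < width then
            -- bw_pixels[y*width+x]: in range under Pre_ (index is nonnegative and < width*height)
            PySem.Int.bor value
              (PySem.Int.band (PySem.List.pyGetD bw_pixels (y * width + x) 0) 1 <<< (7 - bit).toNat)
          else value) 0))))
  "^GFA," ++ PySem.Int.toStr total_bytes ++ "," ++ PySem.Int.toStr total_bytes ++ ","
    ++ PySem.Int.toStr bytes_per_row ++ "," ++ String.join rows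

-- ===== PORT B =====
-- int(chunk, 2): binary parse; exact here since every chunk B builds is a nonempty string of '0'/'1'
def pyParseBin (cs : List Char) : Int :=
  cs.foldl (fun v c => 2 * v + (if c = '1' then 1 else 0)) 0

def bw_to_gfa_alt (width : Int) (height : Int) (bw_pixels : List Int) : String :=
  let bytes_per_row := PySem.Int.floordiv (width + 7) 8
  let total_bytes := bytes_per_row * height
  let data : List String :=
    (PySem.List.pyRange 0 height 1).flatMap (fun y =>
      let bits : List Char :=
        ((PySem.List.pyRange 0 width 1).map (fun x =>
          if PySem.Int.band (PySem.List.pyGetD bw_pixels (y * width + x) 0) 1 ≠ 0 then '1' else '0'))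
        ++ List.replicate (bytes_per_row * 8 - width).toNat '0'   -- "0" * n is "" for n ≤ 0
      (PySem.List.pyRange 0 (bytes_per_row * 8) 8).map (fun i =>
        pvHex2 (pyParseBin (PySem.List.slice bits (some i) (some (i + 8))))))
  "^GFA," ++ PySem.Int.toStr total_bytes ++ "," ++ PySem.Int.toStr total_bytes ++ ","
    ++ PySem.Int.toStr bytes_per_row ++ "," ++ String.join data

-- ===== PRECONDITION & SPEC =====
-- A (and B) raise IndexError iff some pixel index width*height-1 exceeds the list; exactly those inputs are excluded.
def Pre_bw_to_gfa (width : Int) (height : Int) (bw_pixels : List Int) : Prop :=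
  0 < width → 0 < height → width * height ≤ (bw_pixels.length : Int)
instance (width : Int) (height : Int) (bw_pixels : List Int) : Decidable (Pre_bw_to_gfa width height bw_pixels) := by unfold Pre_bw_to_gfa; infer_instance
def pvWitness_bw_to_gfa : Int × Int × List Int := (3, 2, [1, 0, 1, 1, 1, 0])

def Spec_bw_to_gfa (width : Int) (height : Int) (bw_pixels : List Int) (out : String) : Prop := out = bw_to_gfa_alt width height bw_pixels
instance (width : Int) (height : Int) (bw_pixels : List Int) (out : String) : Decidable (Spec_bw_to_gfa width height bw_pixels out) := by unfold Spec_bw_to_gfa; infer_instance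

-- ===== CLAIM (what is proved, stated in full; the proofs are below) =====
def Claim_equal_bw_to_gfa : Prop := ∀ (width : Int) (height : Int) (bw_pixels : List Int), Dom_bw_to_gfa width height bw_pixels → Pre_bw_to_gfa width height bw_pixels → Spec_bw_to_gfa width height bw_pixels (bw_to_gfa width height bw_pixels)

-- ===== LEMMAS AND PROOFS =====

lemma pvBand01 (p : Int) : PySem.Int.band p 1 = 0 ∨ PySem.Int.band p 1 = 1 := by
  rw [PySem.Int.band_one]
  unfold PySem.Int.mod
  rw [Int.fmod_eq_emod]
  simp only [show (0:Int) ≤ 2 by norm_num, true_or, if_pos]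
  omega

lemma pvCond01 (c : Prop) [Decidable c] (p : Int) :
    (if c then PySem.Int.band p 1 else 0) = 0 ∨ (if c then PySem.Int.band p 1 else 0) = 1 := by
  split_ifs
  · exact pvBand01 p
  · exact Or.inl rfl

lemma pvChain (a0 a1 a2 a3 a4 a5 a6 a7 : Int)
    (h0 : a0 = 0 ∨ a0 = 1) (h1 : a1 = 0 ∨ a1 = 1) (h2 : a2 = 0 ∨ a2 = 1)
    (h3 : a3 = 0 ∨ a3 = 1) (h4 : a4 = 0 ∨ a4 = 1) (h5 : a5 = 0 ∨ a5 = 1)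
    (h6 : a6 = 0 ∨ a6 = 1) (h7 : a7 = 0 ∨ a7 = 1) :
    PySem.Int.bor (PySem.Int.bor (PySem.Int.bor (PySem.Int.bor (PySem.Int.bor (PySem.Int.bor
      (PySem.Int.bor (PySem.Int.bor 0 (a0 <<< (7:Nat))) (a1 <<< (6:Nat))) (a2 <<< (5:Nat))) (a3 <<< (4:Nat)))
      (a4 <<< (3:Nat))) (a5 <<< (2:Nat))) (a6 <<< (1:Nat))) (a7 <<< (0:Nat))
    = 2 * (2 * (2 * (2 * (2 * (2 * (2 * (2 * 0 + a0) + a1) + a2) + a3) + a4) + a5) + a6) + a7 := by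
  rcases h0 with rfl | rfl <;> rcases h1 with rfl | rfl <;> rcases h2 with rfl | rfl <;>
    rcases h3 with rfl | rfl <;> rcases h4 with rfl | rfl <;> rcases h5 with rfl | rfl <;>
    rcases h6 with rfl | rfl <;> rcases h7 with rfl | rfl <;> decide

lemma pvIfStep (c : Prop) [Decidable c] (v a : Int) (k : Nat) :
    (if c then PySem.Int.bor v (a <<< k) else v) = PySem.Int.bor v ((if c then a else 0) <<< k) := by
  split_ifs with h
  · rfl
  · rw [Int.zero_shiftLeft, PySem.Int.bor_zero]

lemma pvBit (c : Prop) [Decidable c] (p : Int) :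
    (if (if c then (if PySem.Int.band p 1 ≠ 0 then '1' else '0') else '0') = '1' then (1:Int) else 0)
    = if c then PySem.Int.band p 1 else 0 := by
  rcases pvBand01 p with hb | hb <;> split_ifs with h1 h2 <;> simp_all

lemma pvBitsGet (w : Int) (f : Int → Char) (pad j : Nat)
    (hj : j < w.toNat + pad) :
    (((PySem.List.pyRange 0 w 1).map f) ++ List.replicate pad '0')[j]'(by
        simp [PySem.List.length_pyRange_one]; omega)
      = if (j : Int) < w then f ↑j else '0' := by
  by_cases hjw : j < w.toNat
  · rw [List.getElem_append_left (by simp [PySem.List.length_pyRange_one]; omega)]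
    rw [List.getElem_map, PySem.List.getElem_pyRange_one]
    rw [if_pos (by omega)]
    norm_num
  · rw [List.getElem_append_right (by simp [PySem.List.length_pyRange_one]; omega)]
    rw [List.getElem_replicate, if_neg (by omega)]

lemma pvTake8 {α : Type} (xs : List α) (m : Nat) (h : m + 8 ≤ xs.length) :
    (xs.drop m).take 8 =
      [xs[m]'(by omega), xs[m+1]'(by omega), xs[m+2]'(by omega), xs[m+3]'(by omega),
       xs[m+4]'(by omega), xs[m+5]'(by omega), xs[m+6]'(by omega), xs[m+7]'(by omega)] := by
  apply List.ext_getElem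
  · simp; omega
  · intro i hi1 hi2
    simp only [List.length_take, List.length_drop] at hi1
    rw [List.getElem_take, List.getElem_drop]
    have hi : i < 8 := by omega
    interval_cases i <;> simp


set_option maxHeartbeats 1000000 in
lemma pvByte (w y b : Int) (px : List Int) (k : Nat)
    (hw : 0 < w) (hb1 : w ≤ 8 * b) (hb2 : 8 * b ≤ w + 7) (hk : (k : Int) < b) :
    (PySem.List.pyRange 0 8 1).foldl (fun value bit =>
        if (0 + (k:Int)) * 8 + bit < w then
          PySem.Int.bor value
            (PySem.Int.band (PySem.List.pyGetD px (y * w + ((0 + (k:Int)) * 8 + bit)) 0) 1 <<< (7 - bit).toNat)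
        else value) 0
    = pyParseBin (PySem.List.slice
        (((PySem.List.pyRange 0 w 1).map (fun x =>
            if PySem.Int.band (PySem.List.pyGetD px (y * w + x) 0) 1 ≠ 0 then '1' else '0'))
          ++ List.replicate (b * 8 - w).toNat '0')
        (some (0 + 8 * (k:Int))) (some (0 + 8 * (k:Int) + 8))) := by
  have hf : (fun (value bit : Int) =>
        if (0 + (k:Int)) * 8 + bit < w then
          PySem.Int.bor value
            (PySem.Int.band (PySem.List.pyGetD px (y * w + ((0 + (k:Int)) * 8 + bit)) 0) 1 <<< (7 - bit).toNat)
        else value)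
      = (fun (value bit : Int) =>
        PySem.Int.bor value
          ((if (0 + (k:Int)) * 8 + bit < w then
              PySem.Int.band (PySem.List.pyGetD px (y * w + ((0 + (k:Int)) * 8 + bit)) 0) 1
            else 0) <<< (7 - bit).toNat)) := by
    funext v t
    exact pvIfStep _ _ _ _
  rw [hf]
  rw [show (0 + 8 * (k:Int)) = ((8*k : Nat) : Int) from by push_cast; ring]
  rw [show ((8*k:Nat):Int) + 8 = ((8*k+8 : Nat):Int) from by push_cast; ring]
  rw [PySem.List.slice_natCast]
  rw [show 8*k + 8 - 8*k = 8 from by omega]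
  rw [show PySem.List.pyRange 0 8 1 = [0,1,2,3,4,5,6,7] from by decide]
  dsimp only [List.foldl]
  rw [pvTake8 _ (8*k) (by simp [PySem.List.length_pyRange_one]; omega)]
  dsimp only [pyParseBin, List.foldl]
  rw [pvBitsGet w _ _ (8*k) (by omega), pvBitsGet w _ _ (8*k+1) (by omega),
      pvBitsGet w _ _ (8*k+2) (by omega), pvBitsGet w _ _ (8*k+3) (by omega),
      pvBitsGet w _ _ (8*k+4) (by omega), pvBitsGet w _ _ (8*k+5) (by omega),
      pvBitsGet w _ _ (8*k+6) (by omega), pvBitsGet w _ _ (8*k+7) (by omega)]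

  simp only [pvBit]
  rw [show ((8*k : Nat) : Int) = (0 + (k:Int)) * 8 + 0 from by push_cast; ring,
      show ((8*k+1 : Nat) : Int) = (0 + (k:Int)) * 8 + 1 from by push_cast; ring,
      show ((8*k+2 : Nat) : Int) = (0 + (k:Int)) * 8 + 2 from by push_cast; ring,
      show ((8*k+3 : Nat) : Int) = (0 + (k:Int)) * 8 + 3 from by push_cast; ring,
      show ((8*k+4 : Nat) : Int) = (0 + (k:Int)) * 8 + 4 from by push_cast; ring,
      show ((8*k+5 : Nat) : Int) = (0 + (k:Int)) * 8 + 5 from by push_cast; ring,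
      show ((8*k+6 : Nat) : Int) = (0 + (k:Int)) * 8 + 6 from by push_cast; ring,
      show ((8*k+7 : Nat) : Int) = (0 + (k:Int)) * 8 + 7 from by push_cast; ring]
  simp only [show ((7:Int)-0).toNat = 7 from by decide, show ((7:Int)-1).toNat = 6 from by decide,
    show ((7:Int)-2).toNat = 5 from by decide, show ((7:Int)-3).toNat = 4 from by decide,
    show ((7:Int)-4).toNat = 3 from by decide, show ((7:Int)-5).toNat = 2 from by decide,
    show ((7:Int)-6).toNat = 1 from by decide, show ((7:Int)-7).toNat = 0 from by decide]
  set a0 : Int := (if (0 + (k:Int)) * 8 + 0 < w then PySem.Int.band (PySem.List.pyGetD px (y * w + ((0 + (k:Int)) * 8 + 0)) 0) 1 else 0) with ha0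
  have h0 : a0 = 0 ∨ a0 = 1 := by rw [ha0]; exact pvCond01 _ _
  set a1 : Int := (if (0 + (k:Int)) * 8 + 1 < w then PySem.Int.band (PySem.List.pyGetD px (y * w + ((0 + (k:Int)) * 8 + 1)) 0) 1 else 0) with ha1
  have h1 : a1 = 0 ∨ a1 = 1 := by rw [ha1]; exact pvCond01 _ _
  set a2 : Int := (if (0 + (k:Int)) * 8 + 2 < w then PySem.Int.band (PySem.List.pyGetD px (y * w + ((0 + (k:Int)) * 8 + 2)) 0) 1 else 0) with ha2
  have h2 : a2 = 0 ∨ a2 = 1 := by rw [ha2]; exact pvCond01 _ _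
  set a3 : Int := (if (0 + (k:Int)) * 8 + 3 < w then PySem.Int.band (PySem.List.pyGetD px (y * w + ((0 + (k:Int)) * 8 + 3)) 0) 1 else 0) with ha3
  have h3 : a3 = 0 ∨ a3 = 1 := by rw [ha3]; exact pvCond01 _ _
  set a4 : Int := (if (0 + (k:Int)) * 8 + 4 < w then PySem.Int.band (PySem.List.pyGetD px (y * w + ((0 + (k:Int)) * 8 + 4)) 0) 1 else 0) with ha4
  have h4 : a4 = 0 ∨ a4 = 1 := by rw [ha4]; exact pvCond01 _ _
  set a5 : Int := (if (0 + (k:Int)) * 8 + 5 < w then PySem.Int.band (PySem.List.pyGetD px (y * w + ((0 + (k:Int)) * 8 + 5)) 0) 1 else 0) with ha5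
  have h5 : a5 = 0 ∨ a5 = 1 := by rw [ha5]; exact pvCond01 _ _
  set a6 : Int := (if (0 + (k:Int)) * 8 + 6 < w then PySem.Int.band (PySem.List.pyGetD px (y * w + ((0 + (k:Int)) * 8 + 6)) 0) 1 else 0) with ha6
  have h6 : a6 = 0 ∨ a6 = 1 := by rw [ha6]; exact pvCond01 _ _
  set a7 : Int := (if (0 + (k:Int)) * 8 + 7 < w then PySem.Int.band (PySem.List.pyGetD px (y * w + ((0 + (k:Int)) * 8 + 7)) 0) 1 else 0) with ha7
  have h7 : a7 = 0 ∨ a7 = 1 := by rw [ha7]; exact pvCond01 _ _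
  exact pvChain a0 a1 a2 a3 a4 a5 a6 a7 h0 h1 h2 h3 h4 h5 h6 h7

lemma pvFlat {α : Type} (l : List α) (f : α → List String) :
    (List.map String.toList (l.flatMap f)).flatten
      = (l.map (fun y => (List.map String.toList (f y)).flatten)).flatten := by
  induction l with
  | nil => rfl
  | cons a t ih => simp_all

lemma pvJoinFlatMap {α : Type} (l : List α) (f : α → List String) :
    String.join (l.flatMap f) = String.join (l.map fun y => String.join (f y)) := by
  rw [String.join_eq, String.join_eq]
  congr 1
  simp only [List.map_map, Function.comp_def, String.join_eq]
  rw [pvFlat]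
  congr 1
  apply List.map_congr_left
  intro y _
  simp

lemma pvRow (w y b : Int) (px : List Int) (hb1 : w ≤ 8 * b) (hb2 : 8 * b ≤ w + 7) :
    (PySem.List.pyRange 0 b 1).map (fun byte_index =>
        pvHex2 ((PySem.List.pyRange 0 8 1).foldl (fun value bit =>
          if byte_index * 8 + bit < w then
            PySem.Int.bor value
              (PySem.Int.band (PySem.List.pyGetD px (y * w + (byte_index * 8 + bit)) 0) 1 <<< (7 - bit).toNat)
          else value) 0))
    = (PySem.List.pyRange 0 (b * 8) 8).map (fun i =>
        pvHex2 (pyParseBin (PySem.List.slice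
          (((PySem.List.pyRange 0 w 1).map (fun x =>
              if PySem.Int.band (PySem.List.pyGetD px (y * w + x) 0) 1 ≠ 0 then '1' else '0'))
            ++ List.replicate (b * 8 - w).toNat '0')
          (some i) (some (i + 8))))) := by
  by_cases hw : 0 < w
  · rw [PySem.List.pyRange_one 0 b, PySem.List.pyRange_of_pos 0 (b * 8) (by norm_num)]
    rw [if_pos (by omega : (0:Int) < b * 8)]
    rw [show ((b * 8 - 0 + 8 - 1) / 8).toNat = (b - 0).toNat from by omega]
    simp only [List.map_map]
    apply List.map_congr_left
    intro k hk
    rw [List.mem_range] at hk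
    simp only [Function.comp_def]
    exact congrArg pvHex2 (pvByte w y b px k hw hb1 hb2 (by omega))
  · rw [PySem.List.pyRange_one_eq_nil (by omega : b ≤ 0),
        PySem.List.pyRange_of_pos 0 (b * 8) (by norm_num)]
    rw [if_neg (by omega : ¬ (0:Int) < b * 8)]
    simp

-- ===== VERDICT (by name: the statement is the Claim_ definition above) =====
theorem bw_to_gfa_spec : Claim_equal_bw_to_gfa := by
  intro width height bw_pixels _ _
  unfold Spec_bw_to_gfa bw_to_gfa bw_to_gfa_alt
  dsimp only
  congr 1
  rw [pvJoinFlatMap]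
  congr 1
  apply List.map_congr_left
  intro y _
  exact congrArg String.join (pvRow width y (PySem.Int.floordiv (width + 7) 8) bw_pixels
    (by unfold PySem.Int.floordiv; rw [Int.fdiv_eq_ediv]; omega)
    (by unfold PySem.Int.floordiv; rw [Int.fdiv_eq_ediv]; omega))
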